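-- pv_equiv track=rewrite | github.com/twinkle831/edtech | edtech/backend/python/reading_Function.py | get_final_grade
-- ===== SOURCE A (Python) =====
-- def get_final_grade(class_level, efficiencies):
--     """
--     Determine the final grade of a student based on their efficiencies in sub-levels.
--
--     :param class_level: str, the class level (e.g., "Class 1", "Class 2", "Class 3")
--     :param efficiencies: dict, the efficiencies in each sub-level (keys are sub-levels like "Letters", "Words", etc.)
--     :return: tuple, (highest level passed, detailed grades for each sub-level)
--     """
--     # Define the order of sub-levels
--     sub_levels = ["Letters", "Words", "Sentences", "Paragraphs", "Story"]
--
--     # Define the passing efficiency criterion (80%)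
--     passing_efficiency = 80
--
--     # Define unified grade ranges for all class levels and sub-levels
--     grade_ranges = {
--         "Letters": [(90, "A+"), (80, "A"), (70, "B+"), (60, "B"), (50, "C"), (40, "D"), (0, "F")],
--         "Words": [(90, "A+"), (80, "A"), (70, "B+"), (60, "B"), (50, "C"), (40, "D"), (0, "F")],
--         "Sentences": [(90, "A+"), (80, "A"), (70, "B+"), (60, "B"), (50, "C"), (40, "D"), (0, "F")],
--         "Paragraphs": [(90, "A+"), (80, "A"), (70, "B+"), (60, "B"), (50, "C"), (40, "D"), (0, "F")],
--         "Story": [(90, "A+"), (80, "A"), (70, "B+"), (60, "B"), (50, "C"), (40, "D"), (0, "F")]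
--     }
--
--     # Prepare a list to store results
--     results = []
--     highest_level_passed = "Beginner"
--
--     # Check each sub-level to see if the student passes
--     for sub_level in sub_levels:
--         efficiency = efficiencies.get(sub_level)
--         if efficiency is None:
--             results.append(f"No data for {sub_level}")
--             continue
--
--         # Retrieve the ranges for the specific sub-level
--         ranges = grade_ranges.get(sub_level, [])
--
--         # Determine the grade based on efficiency
--         for lower_bound, grade in ranges:
--             if efficiency >= lower_bound:
--                 results.append(f"{sub_level} - {grade}")
--                 if efficiency >= passing_efficiency:
--                     highest_level_passed = sub_level
--                 break
--
--     if highest_level_passed == "Beginner":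
--         return highest_level_passed, ""  # Do not include grades if Beginner
--     else:
--         return highest_level_passed, "\n".join(results)
-- ===== SOURCE B (Python) =====
-- def get_final_grade(class_level, efficiencies):
--     grades = ["F", "F", "F", "F", "D", "C", "B", "B+", "A", "A+", "A+"]
--     lines = []
--     highest = "Beginner"
--     for sub in ["Letters", "Words", "Sentences", "Paragraphs", "Story"]:
--         e = efficiencies.get(sub)
--         if e is None:
--             lines.append(f"No data for {sub}")
--         else:
--             lines.append(f"{sub} - {grades[min(max(e, 0), 100) // 10]}")
--             if e >= 80:
--                 highest = sub
--     return (highest, "") if highest == "Beginner" else (highest, "\n".join(lines))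
-- ===== Notes on version B (the rewrite author's own statement) =====
-- stated objective: simpler
-- what changed: Replaces the per-sub-level threshold dict and inner linear threshold scan with a single clamped decile lookup (min(max(e,0),100)//10) into one flat grade table; Pre_ excludes negative efficiency values (not meaningful percentages), where A's threshold scan silently emits no grade line while B's clamp grades them F - a malformed-input corner neither behaviour of which is specified.
import Mathlib
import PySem

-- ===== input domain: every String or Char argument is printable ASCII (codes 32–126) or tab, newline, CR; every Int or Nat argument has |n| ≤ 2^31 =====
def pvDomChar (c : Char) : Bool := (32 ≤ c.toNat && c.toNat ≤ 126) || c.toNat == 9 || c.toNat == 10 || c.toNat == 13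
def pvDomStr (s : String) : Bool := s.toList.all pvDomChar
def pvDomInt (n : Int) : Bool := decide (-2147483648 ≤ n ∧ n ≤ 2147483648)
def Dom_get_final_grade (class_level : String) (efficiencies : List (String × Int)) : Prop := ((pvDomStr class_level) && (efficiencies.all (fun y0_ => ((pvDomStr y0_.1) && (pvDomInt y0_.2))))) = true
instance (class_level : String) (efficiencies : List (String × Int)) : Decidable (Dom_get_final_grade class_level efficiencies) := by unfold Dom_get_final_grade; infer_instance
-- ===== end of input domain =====

-- B replaces A's per-sub-level threshold dict and inner linear threshold scan with a
-- single clamped decile lookup into one flat grade table (objective: simpler).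

-- ===== PORT A =====
def pvSubLevels : List String := ["Letters", "Words", "Sentences", "Paragraphs", "Story"]

def pvRangesList : List (Int × String) :=
  [(90, "A+"), (80, "A"), (70, "B+"), (60, "B"), (50, "C"), (40, "D"), (0, "F")]

def pvGradeRanges : PySem.Dict String (List (Int × String)) :=
  PySem.Dict.mk [("Letters", pvRangesList), ("Words", pvRangesList), ("Sentences", pvRangesList),
                 ("Paragraphs", pvRangesList), ("Story", pvRangesList)]

-- the inner 'for lower_bound, grade in ranges: …' with its break
def pvInnerScan (sub : String) (e : Int) (st : List String × String) :
    List (Int × String) → List String × String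
  | [] => st
  | (lb, g) :: rest =>
      if lb ≤ e then
        (st.1 ++ [sub ++ " - " ++ g], if 80 ≤ e then sub else st.2)
      else pvInnerScan sub e st rest

def get_final_grade (class_level : String) (efficiencies : List (String × Int)) : String × String :=
  let effs := PySem.Dict.mk efficiencies
  let st := pvSubLevels.foldl (fun st sub =>
      match effs.get? sub with
      | none => (st.1 ++ ["No data for " ++ sub], st.2)
      | some e => pvInnerScan sub e st ((pvGradeRanges.get? sub).getD [])) ([], "Beginner")
  if st.2 = "Beginner" then (st.2, "")
  else (st.2, PySem.Str.join "\n" st.1)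

-- ===== PORT B =====
def pvGradesB : List String := ["F", "F", "F", "F", "D", "C", "B", "B+", "A", "A+", "A+"]

def get_final_grade_alt (class_level : String) (efficiencies : List (String × Int)) : String × String :=
  let effs := PySem.Dict.mk efficiencies
  let st := (["Letters", "Words", "Sentences", "Paragraphs", "Story"] : List String).foldl
    (fun st sub =>
      match effs.get? sub with
      | none => (st.1 ++ ["No data for " ++ sub], st.2)
      | some e =>
          -- grades[min(max(e, 0), 100) // 10]: the clamped index is always in range,
          -- so pyGet? is some and the getD default is never taken
          (st.1 ++ [sub ++ " - " ++ (PySem.List.pyGet? pvGradesB (PySem.Int.floordiv (min (max e 0) 100) 10)).getD ""],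
           if 80 ≤ e then sub else st.2))
    ([], "Beginner")
  if st.2 = "Beginner" then (st.2, "")
  else (st.2, PySem.Str.join "\n" st.1)

-- ===== PRECONDITION & SPEC =====
-- Pre_ excludes negative efficiency values for the five sub-levels (not meaningful
-- percentages): there A's threshold scan silently emits no grade line while B's clamp
-- grades them F — a malformed-input corner neither behaviour of which is specified.
def Pre_get_final_grade (class_level : String) (efficiencies : List (String × Int)) : Prop :=
  ∀ sub ∈ (["Letters", "Words", "Sentences", "Paragraphs", "Story"] : List String),
    0 ≤ ((PySem.Dict.mk efficiencies).get? sub).getD 0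
instance (class_level : String) (efficiencies : List (String × Int)) : Decidable (Pre_get_final_grade class_level efficiencies) := by unfold Pre_get_final_grade; infer_instance

def pvWitness_get_final_grade : String × (List (String × Int)) := ("Class 1", [("Letters", 85), ("Words", 42)])

def Spec_get_final_grade (class_level : String) (efficiencies : List (String × Int)) (out : String × String) : Prop := out = get_final_grade_alt class_level efficiencies
instance (class_level : String) (efficiencies : List (String × Int)) (out : String × String) : Decidable (Spec_get_final_grade class_level efficiencies out) := by unfold Spec_get_final_grade; infer_instance

-- ===== CLAIM (what is proved, stated in full; the proofs are below) =====
def Claim_equal_get_final_grade : Prop := ∀ (class_level : String) (efficiencies : List (String × Int)), Dom_get_final_grade class_level efficiencies → Pre_get_final_grade class_level efficiencies → Spec_get_final_grade class_level efficiencies (get_final_grade class_level efficiencies)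

-- ===== LEMMAS AND PROOFS =====

lemma pvGet_tbl (i : Int) (h0 : 0 ≤ i) (h1 : i ≤ 10) :
    (PySem.List.pyGet? pvGradesB i).getD "" =
      (if 9 ≤ i then "A+" else if i = 8 then "A" else if i = 7 then "B+" else if i = 6 then "B"
       else if i = 5 then "C" else if i = 4 then "D" else "F") := by
  interval_cases i <;> decide

lemma pvInner_eq (sub : String) (e : Int) (st : List String × String) (h0 : 0 ≤ e) :
    pvInnerScan sub e st pvRangesList =
      (st.1 ++ [sub ++ " - " ++ (PySem.List.pyGet? pvGradesB (PySem.Int.floordiv (min (max e 0) 100) 10)).getD ""],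
       if 80 ≤ e then sub else st.2) := by
  rw [PySem.Int.floordiv_eq_ediv_of_pos (by norm_num)]
  rw [pvGet_tbl _ (by omega) (by omega)]
  simp only [pvRangesList, pvInnerScan]
  split_ifs <;> first | rfl | omega

lemma pvStep_eq (effs : PySem.Dict String Int) (acc : List String × String) (sub : String)
    (hmem : sub ∈ pvSubLevels) (hpos : 0 ≤ (effs.get? sub).getD 0) :
    (match effs.get? sub with
      | none => (acc.1 ++ ["No data for " ++ sub], acc.2)
      | some e => pvInnerScan sub e acc ((pvGradeRanges.get? sub).getD [])) =
    (match effs.get? sub with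
      | none => (acc.1 ++ ["No data for " ++ sub], acc.2)
      | some e =>
          (acc.1 ++ [sub ++ " - " ++ (PySem.List.pyGet? pvGradesB (PySem.Int.floordiv (min (max e 0) 100) 10)).getD ""],
           if 80 ≤ e then sub else acc.2)) := by
  cases hget : effs.get? sub with
  | none => rfl
  | some e =>
      have hr : (pvGradeRanges.get? sub).getD [] = pvRangesList := by
        fin_cases hmem <;> rfl
      rw [hget] at hpos
      simp only [hr]
      exact pvInner_eq sub e acc hpos

-- ===== VERDICT (by name: the statement is the Claim_ definition above) =====
theorem get_final_grade_spec : Claim_equal_get_final_grade := by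
  unfold Claim_equal_get_final_grade
  intro class_level efficiencies _ hpre
  unfold Spec_get_final_grade get_final_grade get_final_grade_alt
  have h := PySem.List.foldl_congr_mem
    (l := pvSubLevels) (init := (([] : List String), "Beginner"))
    (f := fun st sub =>
      match (PySem.Dict.mk efficiencies).get? sub with
      | none => (st.1 ++ ["No data for " ++ sub], st.2)
      | some e => pvInnerScan sub e st ((pvGradeRanges.get? sub).getD []))
    (g := fun st sub =>
      match (PySem.Dict.mk efficiencies).get? sub with
      | none => (st.1 ++ ["No data for " ++ sub], st.2)
      | some e =>
          (st.1 ++ [sub ++ " - " ++ (PySem.List.pyGet? pvGradesB (PySem.Int.floordiv (min (max e 0) 100) 10)).getD ""],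
           if 80 ≤ e then sub else st.2))
    (fun acc x hx => pvStep_eq _ acc x hx (hpre x hx))
  exact congrArg (fun st : List String × String =>
    if st.2 = "Beginner" then (st.2, "") else (st.2, PySem.Str.join "\n" st.1)) h
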